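-- pv_equiv track=rewrite | github.com/Sub-Precision/Coding-Assignments | Algorithms/HW5/HW5C/HW5C.py | spell_check
-- ===== SOURCE A (Python) =====
-- def edit_distance(s1, s2):
--     m, n = len(s1), len(s2)
--     dp = [[0] * (n + 1) for _ in range(m + 1)]
--
--     for i in range(m + 1):
--         dp[i][0] = i
--
--     for j in range(n + 1):
--         dp[0][j] = j
--
--     for i in range(1, m + 1):
--         for j in range(1, n + 1):
--             if s1[i - 1] == s2[j - 1]:
--                 dp[i][j] = dp[i - 1][j - 1]
--             else:
--                 dp[i][j] = 1 + min(dp[i - 1][j], dp[i][j - 1], dp[i - 1][j - 1])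
--
--     return dp[m][n]
--
-- def spell_check(word, dictionary):
--     min_distance = float('inf')
--     suggested_word = None
--
--     for w in dictionary:
--         distance = edit_distance(word, w)
--         if distance < min_distance:
--             min_distance = distance
--             suggested_word = w
--
--     return suggested_word
-- ===== SOURCE B (Python) =====
-- def _ed(s1, s2):
--     # top-down edit distance with memoization (demand-driven instead of a full table)
--     memo = {}
--     def go(i, j):
--         if i == 0:
--             return j
--         if j == 0:
--             return i
--         key = (i, j)
--         if key in memo:
--             return memo[key]
--         if s1[i - 1] == s2[j - 1]:
--             r = go(i - 1, j - 1)
--         else: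
--             r = 1 + min(go(i - 1, j), go(i, j - 1), go(i - 1, j - 1))
--         memo[key] = r
--         return r
--     return go(len(s1), len(s2))
--
-- def spell_check(word, dictionary):
--     best_d = None
--     suggested_word = None
--     for w in dictionary:
--         d = _ed(word, w)
--         if best_d is None or d < best_d:
--             best_d = d
--             suggested_word = w
--     return suggested_word
-- ===== Notes on version B (the rewrite author's own statement) =====
-- stated objective: alternative
-- what changed: edit_distance is recomputed top-down by recursion on the index pair with a memo dict filled on demand, instead of A's preallocated bottom-up (m+1)x(n+1) table; the outer minimum loop tracks the best distance with None instead of float('inf').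
import Mathlib
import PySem

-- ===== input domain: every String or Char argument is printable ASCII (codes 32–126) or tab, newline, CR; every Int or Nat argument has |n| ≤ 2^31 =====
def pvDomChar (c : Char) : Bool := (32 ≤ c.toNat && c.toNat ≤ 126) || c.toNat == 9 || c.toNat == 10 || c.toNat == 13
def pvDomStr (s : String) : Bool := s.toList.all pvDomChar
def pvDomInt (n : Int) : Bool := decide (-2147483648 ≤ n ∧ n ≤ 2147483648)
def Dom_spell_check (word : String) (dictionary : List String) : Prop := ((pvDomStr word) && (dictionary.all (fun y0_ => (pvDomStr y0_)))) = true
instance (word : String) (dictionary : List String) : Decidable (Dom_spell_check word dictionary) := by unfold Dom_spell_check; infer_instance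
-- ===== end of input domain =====

-- B replaces A's preallocated bottom-up (m+1)×(n+1) edit-distance table by top-down
-- recursion on the index pair with a memo dict filled on demand (alternative decomposition,
-- same asymptotic cost); the outer minimum loop tracks the best distance with None instead
-- of float('inf').

-- ===== PORT A =====
-- helpers for the mutable 2D list dp: dp[i][j] read and dp[i][j] = v write
def pvGet2 (dp : List (List Nat)) (i j : Nat) : Nat := (dp.getD i []).getD j 0
def pvSet2 (dp : List (List Nat)) (i j v : Nat) : List (List Nat) :=
  dp.set i ((dp.getD i []).set j v)

-- literal port of A's edit_distance; s1[i-1]/s2[j-1] via getD (indices are in range: 1 ≤ i ≤ m)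
def edit_distance (s1 s2 : List Char) : Nat :=
  let m := s1.length
  let n := s2.length
  let dp0 := List.replicate (m+1) (List.replicate (n+1) (0:Nat))
  let dp1 := (List.range (m+1)).foldl (fun dp i => pvSet2 dp i 0 i) dp0
  let dp2 := (List.range (n+1)).foldl (fun dp j => pvSet2 dp 0 j j) dp1
  let dp3 := (List.range' 1 m).foldl (fun dp i =>
      (List.range' 1 n).foldl (fun dp j =>
        if s1.getD (i-1) ' ' = s2.getD (j-1) ' ' then
          pvSet2 dp i j (pvGet2 dp (i-1) (j-1))
        else
          pvSet2 dp i j (1 + min (pvGet2 dp (i-1) j) (min (pvGet2 dp i (j-1)) (pvGet2 dp (i-1) (j-1))))) dp) dp2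
  pvGet2 dp3 m n

-- min_distance = float('inf') is modelled as none (distance < inf is always true)
def spell_check (word : String) (dictionary : List String) : Option String :=
  (dictionary.foldl (fun st w =>
      let distance := edit_distance word.toList w.toList
      match st.1 with
      | none => (some distance, some w)
      | some md => if distance < md then (some distance, some w) else st)
    ((none : Option Nat), (none : Option String))).2

-- ===== PORT B =====
-- literal port of Source B's go: top-down recursion with a memo dict, filled on demand
def pvEdGo (s1 s2 : List Char) (i j : Nat) (memo : PySem.Dict (Nat × Nat) Nat) :
    Nat × PySem.Dict (Nat × Nat) Nat :=
  if i = 0 then (j, memo)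
  else if j = 0 then (i, memo)
  else
    match memo.get? (i, j) with
    | some v => (v, memo)
    | none =>
      if s1.getD (i-1) ' ' = s2.getD (j-1) ' ' then
        let p := pvEdGo s1 s2 (i-1) (j-1) memo
        (p.1, p.2.insert (i, j) p.1)
      else
        let p1 := pvEdGo s1 s2 (i-1) j memo
        let p2 := pvEdGo s1 s2 i (j-1) p1.2
        let p3 := pvEdGo s1 s2 (i-1) (j-1) p2.2
        let r := 1 + min p1.1 (min p2.1 p3.1)
        (r, p3.2.insert (i, j) r)
termination_by i + j
decreasing_by all_goals omega

def pvEd (s1 s2 : List Char) : Nat :=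
  (pvEdGo s1 s2 s1.length s2.length PySem.Dict.empty).1

def spell_check_alt (word : String) (dictionary : List String) : Option String :=
  (dictionary.foldl (fun st w =>
      let d := pvEd word.toList w.toList
      if st.1 = none ∨ d < st.1.getD 0 then (some d, some w) else st)
    ((none : Option Nat), (none : Option String))).2

-- ===== PRECONDITION & SPEC =====
def Spec_spell_check (word : String) (dictionary : List String) (out : Option String) : Prop := out = spell_check_alt word dictionary
instance (word : String) (dictionary : List String) (out : Option String) : Decidable (Spec_spell_check word dictionary out) := by unfold Spec_spell_check; infer_instance

-- ===== CLAIM (what is proved, stated in full; the proofs are below) =====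
def Claim_equal_spell_check : Prop := ∀ (word : String) (dictionary : List String), Dom_spell_check word dictionary → Spec_spell_check word dictionary (spell_check word dictionary)

-- ===== LEMMAS AND PROOFS =====

-- mathematical edit distance on index pairs (A's min order kept)
def pvE (s1 s2 : List Char) : Nat → Nat → Nat
  | 0, j => j
  | i+1, 0 => i+1
  | i+1, j+1 =>
      if s1.getD i ' ' = s2.getD j ' ' then pvE s1 s2 i j
      else 1 + min (pvE s1 s2 i (j+1)) (min (pvE s1 s2 (i+1) j) (pvE s1 s2 i j))
termination_by i j => i + j

theorem pvE_succ (s1 s2 : List Char) (i j : Nat) :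
    pvE s1 s2 (i+1) (j+1) =
      if s1.getD i ' ' = s2.getD j ' ' then pvE s1 s2 i j
      else 1 + min (pvE s1 s2 i (j+1)) (min (pvE s1 s2 (i+1) j) (pvE s1 s2 i j)) := by
  conv_lhs => rw [pvE]

-- ---- A side ----

-- the table stays a (m+1) x (n+1) rectangle
def pvShape (m n : Nat) (dp : List (List Nat)) : Prop :=
  dp.length = m + 1 ∧ ∀ row ∈ dp, row.length = n + 1

theorem pvShape_set2 (m n : Nat) (dp : List (List Nat)) (hs : pvShape m n dp)
    (i j v : Nat) (hi : i ≤ m) : pvShape m n (pvSet2 dp i j v) := by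
  have h1 := hs.1
  have hlen : i < dp.length := by omega
  refine ⟨by simp [pvSet2, hs.1], ?_⟩
  intro row hr
  rcases List.mem_or_eq_of_mem_set hr with h | h
  · exact hs.2 _ h
  · subst h
    rw [List.length_set, List.getD_eq_getElem dp [] hlen]
    exact hs.2 _ (List.getElem_mem hlen)

theorem pvGet2_set2 (m n : Nat) (dp : List (List Nat)) (hs : pvShape m n dp)
    (i j v : Nat) (hi : i ≤ m) (hj : j ≤ n) (i' j' : Nat) :
    pvGet2 (pvSet2 dp i j v) i' j' = if i' = i ∧ j' = j then v else pvGet2 dp i' j' := by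
  have h1' := hs.1
  have hlen : i < dp.length := by omega
  have hrow : (dp.getD i []).length = n + 1 := by
    rw [List.getD_eq_getElem dp [] hlen]
    exact hs.2 _ (List.getElem_mem hlen)
  have houter : (dp.set i ((dp.getD i []).set j v)).getD i' [] =
      if i' = i then (dp.getD i []).set j v else dp.getD i' [] := by
    by_cases h1 : i' = i
    · subst h1
      rw [if_pos rfl, List.getD_eq_getElem?_getD, List.getElem?_set_self hlen]
      rfl
    · rw [if_neg h1, List.getD_eq_getElem?_getD, List.getElem?_set_ne (fun h => h1 h.symm),
        ← List.getD_eq_getElem?_getD]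
  unfold pvGet2 pvSet2
  rw [houter]
  by_cases h1 : i' = i
  · rw [if_pos h1]
    by_cases h2 : j' = j
    · subst h2
      rw [if_pos ⟨h1, rfl⟩, List.getD_eq_getElem?_getD, List.getElem?_set_self (by omega)]
      simp
    · rw [if_neg (by tauto), List.getD_eq_getElem?_getD,
        List.getElem?_set_ne (fun h => h2 h.symm), ← List.getD_eq_getElem?_getD, h1]
  · rw [if_neg h1, if_neg (by tauto)]

-- value of the table after the two initialisation loops
def pvBase (m n i' j' : Nat) : Nat :=
  if i' = 0 ∧ j' ≤ n then j' else if j' = 0 ∧ i' ≤ m then i' else 0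

-- value of the table after the first k rows of the main loop have been filled
def pvAfter (s1 s2 : List Char) (m n k i' j' : Nat) : Nat :=
  if 1 ≤ i' ∧ i' ≤ k ∧ 1 ≤ j' ∧ j' ≤ n then pvE s1 s2 i' j' else pvBase m n i' j'

theorem pvDp1 (m n k : Nat) (hk : k ≤ m + 1) (dp : List (List Nat)) (hs : pvShape m n dp) :
    pvShape m n ((List.range k).foldl (fun dp i => pvSet2 dp i 0 i) dp) ∧
    ∀ i' j', pvGet2 ((List.range k).foldl (fun dp i => pvSet2 dp i 0 i) dp) i' j' =
      if j' = 0 ∧ i' < k then i' else pvGet2 dp i' j' := by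
  induction k with
  | zero => exact ⟨hs, by simp⟩
  | succ k ih =>
    obtain ⟨hsR, hR⟩ := ih (by omega)
    rw [List.range_succ, List.foldl_append]
    simp only [List.foldl_cons, List.foldl_nil]
    refine ⟨pvShape_set2 m n _ hsR k 0 k (by omega), ?_⟩
    intro i' j'
    rw [pvGet2_set2 m n _ hsR k 0 k (by omega) (by omega) i' j', hR i' j']
    split_ifs <;> omega

theorem pvDp2 (m n k : Nat) (hk : k ≤ n + 1) (dp : List (List Nat)) (hs : pvShape m n dp) :
    pvShape m n ((List.range k).foldl (fun dp j => pvSet2 dp 0 j j) dp) ∧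
    ∀ i' j', pvGet2 ((List.range k).foldl (fun dp j => pvSet2 dp 0 j j) dp) i' j' =
      if i' = 0 ∧ j' < k then j' else pvGet2 dp i' j' := by
  induction k with
  | zero => exact ⟨hs, by simp⟩
  | succ k ih =>
    obtain ⟨hsR, hR⟩ := ih (by omega)
    rw [List.range_succ, List.foldl_append]
    simp only [List.foldl_cons, List.foldl_nil]
    refine ⟨pvShape_set2 m n _ hsR 0 k k (by omega), ?_⟩
    intro i' j'
    rw [pvGet2_set2 m n _ hsR 0 k k (by omega) (by omega) i' j', hR i' j']
    split_ifs <;> omega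

theorem pvAfter_eq_E (s1 s2 : List Char) (m n k i' j' : Nat)
    (hk : k ≤ m) (hi : i' ≤ k) (hj : j' ≤ n) :
    pvAfter s1 s2 m n k i' j' = pvE s1 s2 i' j' := by
  unfold pvAfter pvBase
  rcases Nat.eq_zero_or_pos i' with h | h
  · subst h
    rcases Nat.eq_zero_or_pos j' with h2 | h2
    · subst h2; simp [pvE]
    · simp [pvE, hj]
  · rcases Nat.eq_zero_or_pos j' with h2 | h2
    · subst h2
      obtain ⟨i0, rfl⟩ : ∃ i0, i' = i0 + 1 := ⟨i' - 1, by omega⟩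
      simp [pvE]
      omega
    · have : 1 ≤ i' ∧ i' ≤ k ∧ 1 ≤ j' ∧ j' ≤ n := ⟨h, hi, h2, hj⟩
      simp [this]

-- the inner loop over columns 1..c of row i0+1, starting from the table after row i0
theorem pvInner (s1 s2 : List Char) (m n i0 c : Nat)
    (hm : m = s1.length) (hn : n = s2.length)
    (him : i0 + 1 ≤ m) (hc : c ≤ n)
    (dp : List (List Nat)) (hs : pvShape m n dp)
    (hdp : ∀ i' j', pvGet2 dp i' j' = pvAfter s1 s2 m n i0 i' j') :
    pvShape m n ((List.range' 1 c).foldl (fun dp j =>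
        if s1.getD i0 ' ' = s2.getD (j-1) ' ' then
          pvSet2 dp (i0+1) j (pvGet2 dp i0 (j-1))
        else
          pvSet2 dp (i0+1) j (1 + min (pvGet2 dp i0 j) (min (pvGet2 dp (i0+1) (j-1)) (pvGet2 dp i0 (j-1))))) dp) ∧
    ∀ i' j',
      pvGet2 ((List.range' 1 c).foldl (fun dp j =>
        if s1.getD i0 ' ' = s2.getD (j-1) ' ' then
          pvSet2 dp (i0+1) j (pvGet2 dp i0 (j-1))
        else
          pvSet2 dp (i0+1) j (1 + min (pvGet2 dp i0 j) (min (pvGet2 dp (i0+1) (j-1)) (pvGet2 dp i0 (j-1))))) dp) i' j' =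
      if i' = i0 + 1 ∧ 1 ≤ j' ∧ j' ≤ c then pvE s1 s2 (i0+1) j' else pvAfter s1 s2 m n i0 i' j' := by
  revert hc
  induction c with
  | zero =>
    intro _
    refine ⟨hs, ?_⟩
    intro i' j'
    simp only [List.range', List.foldl_nil, hdp]
    rw [if_neg (by omega)]
  | succ c ih =>
    intro hc
    obtain ⟨hsG, ihg⟩ := ih (by omega)
    have e1 : ∀ b, b ≤ n → pvGet2 ((List.range' 1 c).foldl (fun dp j =>
        if s1.getD i0 ' ' = s2.getD (j-1) ' ' then
          pvSet2 dp (i0+1) j (pvGet2 dp i0 (j-1))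
        else
          pvSet2 dp (i0+1) j (1 + min (pvGet2 dp i0 j) (min (pvGet2 dp (i0+1) (j-1)) (pvGet2 dp i0 (j-1))))) dp) i0 b
        = pvE s1 s2 i0 b := by
      intro b hb
      rw [ihg, if_neg (by omega)]
      exact pvAfter_eq_E s1 s2 m n i0 i0 b (by omega) le_rfl hb
    have e3 : pvGet2 ((List.range' 1 c).foldl (fun dp j =>
        if s1.getD i0 ' ' = s2.getD (j-1) ' ' then
          pvSet2 dp (i0+1) j (pvGet2 dp i0 (j-1))
        else
          pvSet2 dp (i0+1) j (1 + min (pvGet2 dp i0 j) (min (pvGet2 dp (i0+1) (j-1)) (pvGet2 dp i0 (j-1))))) dp) (i0+1) c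
        = pvE s1 s2 (i0+1) c := by
      rcases Nat.eq_zero_or_pos c with rfl | hcpos
      · rw [ihg, if_neg (by omega)]
        unfold pvAfter pvBase
        rw [if_neg (by omega), if_neg (by omega), if_pos (by omega)]
        simp [pvE]
      · rw [ihg, if_pos ⟨rfl, by omega, by omega⟩]
    rw [List.range'_1_concat, List.foldl_append]
    simp only [List.foldl_cons, List.foldl_nil, Nat.add_comm 1 c, Nat.add_sub_cancel]
    by_cases hch : s1.getD i0 ' ' = s2.getD c ' '
    · rw [if_pos hch]
      refine ⟨pvShape_set2 m n _ hsG (i0+1) (c+1) _ (by omega), ?_⟩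
      intro i' j'
      rw [pvGet2_set2 m n _ hsG (i0+1) (c+1) _ (by omega) (by omega) i' j']
      by_cases hij : i' = i0 + 1 ∧ j' = c + 1
      · rw [if_pos hij, if_pos ⟨hij.1, by omega, by omega⟩, hij.2]
        rw [e1 c (by omega), pvE_succ, if_pos hch]
      · rw [if_neg hij, ihg i' j']
        split_ifs <;> first | rfl | omega
    · rw [if_neg hch]
      refine ⟨pvShape_set2 m n _ hsG (i0+1) (c+1) _ (by omega), ?_⟩
      intro i' j'
      rw [pvGet2_set2 m n _ hsG (i0+1) (c+1) _ (by omega) (by omega) i' j']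
      by_cases hij : i' = i0 + 1 ∧ j' = c + 1
      · rw [if_pos hij, if_pos ⟨hij.1, by omega, by omega⟩, hij.2]
        rw [e1 c (by omega), e1 (c+1) (by omega), e3, pvE_succ, if_neg hch]
      · rw [if_neg hij, ihg i' j']
        split_ifs <;> first | rfl | omega

theorem pvOuter (s1 s2 : List Char) (m n k : Nat)
    (hm : m = s1.length) (hn : n = s2.length) (hk : k ≤ m)
    (dp : List (List Nat)) (hs : pvShape m n dp)
    (hdp : ∀ i' j', pvGet2 dp i' j' = pvAfter s1 s2 m n 0 i' j') :
    pvShape m n ((List.range' 1 k).foldl (fun dp i =>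
        (List.range' 1 n).foldl (fun dp j =>
          if s1.getD (i-1) ' ' = s2.getD (j-1) ' ' then
            pvSet2 dp i j (pvGet2 dp (i-1) (j-1))
          else
            pvSet2 dp i j (1 + min (pvGet2 dp (i-1) j) (min (pvGet2 dp i (j-1)) (pvGet2 dp (i-1) (j-1))))) dp) dp) ∧
    ∀ i' j',
      pvGet2 ((List.range' 1 k).foldl (fun dp i =>
        (List.range' 1 n).foldl (fun dp j =>
          if s1.getD (i-1) ' ' = s2.getD (j-1) ' ' then
            pvSet2 dp i j (pvGet2 dp (i-1) (j-1))
          else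
            pvSet2 dp i j (1 + min (pvGet2 dp (i-1) j) (min (pvGet2 dp i (j-1)) (pvGet2 dp (i-1) (j-1))))) dp) dp) i' j' =
      pvAfter s1 s2 m n k i' j' := by
  revert hk
  induction k with
  | zero =>
    intro _
    refine ⟨hs, ?_⟩
    intro i' j'
    simp only [List.range', List.foldl_nil, hdp]
  | succ k ih =>
    intro hk
    obtain ⟨hsG, ihg⟩ := ih (by omega)
    rw [List.range'_1_concat, List.foldl_append]
    simp only [List.foldl_cons, List.foldl_nil, Nat.add_comm 1 k, Nat.add_sub_cancel]
    obtain ⟨hsI, hI⟩ := pvInner s1 s2 m n k n hm hn hk le_rfl _ hsG (fun a b => ihg a b)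
    refine ⟨hsI, ?_⟩
    intro i' j'
    rw [hI i' j']
    by_cases h : i' = k + 1 ∧ 1 ≤ j' ∧ j' ≤ n
    · rw [if_pos h, h.1]
      unfold pvAfter
      rw [if_pos ⟨by omega, le_rfl, by omega, h.2.2⟩]
    · rw [if_neg h]
      unfold pvAfter
      split_ifs <;> first | rfl | omega

theorem edit_distance_eq_E (s1 s2 : List Char) :
    edit_distance s1 s2 = pvE s1 s2 s1.length s2.length := by
  have hs0 : pvShape s1.length s2.length
      (List.replicate (s1.length+1) (List.replicate (s2.length+1) (0:Nat))) := by
    refine ⟨by simp, ?_⟩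
    intro row hr
    rw [List.eq_of_mem_replicate hr]
    simp
  obtain ⟨hs1, h1⟩ := pvDp1 s1.length s2.length (s1.length+1) le_rfl _ hs0
  obtain ⟨hs2, h2⟩ := pvDp2 s1.length s2.length (s2.length+1) le_rfl _ hs1
  have hzero : ∀ i' j',
      pvGet2 (List.replicate (s1.length+1) (List.replicate (s2.length+1) (0:Nat))) i' j' = 0 := by
    intro i' j'
    unfold pvGet2
    simp [List.getD_eq_getElem?_getD, List.getElem?_replicate]
    split_ifs <;> simp
  have hbase : ∀ i' j',
      pvGet2 ((List.range (s2.length+1)).foldl (fun dp j => pvSet2 dp 0 j j)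
        ((List.range (s1.length+1)).foldl (fun dp i => pvSet2 dp i 0 i)
          (List.replicate (s1.length+1) (List.replicate (s2.length+1) (0:Nat))))) i' j' =
      pvAfter s1 s2 s1.length s2.length 0 i' j' := by
    intro i' j'
    rw [h2, h1, hzero i' j']
    unfold pvAfter pvBase
    split_ifs <;> omega
  obtain ⟨_, hout⟩ := pvOuter s1 s2 s1.length s2.length s1.length rfl rfl le_rfl _ hs2 hbase
  show pvGet2 ((List.range' 1 s1.length).foldl (fun dp i =>
        (List.range' 1 s2.length).foldl (fun dp j =>
          if s1.getD (i-1) ' ' = s2.getD (j-1) ' ' then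
            pvSet2 dp i j (pvGet2 dp (i-1) (j-1))
          else
            pvSet2 dp i j (1 + min (pvGet2 dp (i-1) j) (min (pvGet2 dp i (j-1)) (pvGet2 dp (i-1) (j-1))))) dp)
        ((List.range (s2.length+1)).foldl (fun dp j => pvSet2 dp 0 j j)
          ((List.range (s1.length+1)).foldl (fun dp i => pvSet2 dp i 0 i)
            (List.replicate (s1.length+1) (List.replicate (s2.length+1) (0:Nat))))))
        s1.length s2.length = pvE s1 s2 s1.length s2.length
  rw [hout]
  exact pvAfter_eq_E s1 s2 s1.length s2.length s1.length s1.length s2.length le_rfl le_rfl le_rfl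

-- ---- B side ----

def pvGood (s1 s2 : List Char) (memo : PySem.Dict (Nat × Nat) Nat) : Prop :=
  ∀ p v, memo.get? p = some v → v = pvE s1 s2 p.1 p.2

theorem pvEdGo_correct (s1 s2 : List Char) (N : Nat) :
    ∀ i j (memo : PySem.Dict (Nat × Nat) Nat), i + j ≤ N → pvGood s1 s2 memo →
    (pvEdGo s1 s2 i j memo).1 = pvE s1 s2 i j ∧ pvGood s1 s2 (pvEdGo s1 s2 i j memo).2 := by
  induction N with
  | zero =>
    intro i j memo hN hg
    have hi : i = 0 := by omega
    subst hi
    rw [pvEdGo]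
    exact ⟨by simp [pvE], hg⟩
  | succ N ih =>
    intro i j memo hN hg
    rcases Nat.eq_zero_or_pos i with rfl | hi
    · rw [pvEdGo]
      exact ⟨by simp [pvE], hg⟩
    rcases Nat.eq_zero_or_pos j with rfl | hj
    · rw [pvEdGo]
      rw [if_neg (by omega), if_pos rfl]
      refine ⟨?_, hg⟩
      obtain ⟨i0, rfl⟩ : ∃ i0, i = i0 + 1 := ⟨i - 1, by omega⟩
      simp [pvE]
    · obtain ⟨i0, rfl⟩ : ∃ i0, i = i0 + 1 := ⟨i - 1, by omega⟩
      obtain ⟨j0, rfl⟩ : ∃ j0, j = j0 + 1 := ⟨j - 1, by omega⟩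
      rw [pvEdGo, if_neg (by omega), if_neg (by omega)]
      cases hmem : memo.get? (i0 + 1, j0 + 1) with
      | some v =>
        exact ⟨hg (i0 + 1, j0 + 1) v hmem, hg⟩
      | none =>
        simp only [Nat.add_sub_cancel]
        by_cases hch : s1.getD i0 ' ' = s2.getD j0 ' '
        · rw [if_pos hch]
          have hp := ih (i0) (j0) memo (by omega) hg
          refine ⟨?_, ?_⟩
          · show (pvEdGo s1 s2 i0 j0 memo).1 = _
            rw [hp.1, pvE_succ, if_pos hch]
          · show pvGood s1 s2 ((pvEdGo s1 s2 i0 j0 memo).2.insert (i0 + 1, j0 + 1)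
              (pvEdGo s1 s2 i0 j0 memo).1)
            intro q w hq
            rw [PySem.Dict.get?_insert] at hq
            split at hq
            · rename_i hq1
              subst hq1
              cases hq
              rw [hp.1, pvE_succ, if_pos hch]
            · exact hp.2 q w hq
        · rw [if_neg hch]
          have hp1 := ih i0 (j0 + 1) memo (by omega) hg
          have hp2 := ih (i0 + 1) j0 (pvEdGo s1 s2 i0 (j0 + 1) memo).2 (by omega) hp1.2
          have hp3 := ih i0 j0 (pvEdGo s1 s2 (i0 + 1) j0 (pvEdGo s1 s2 i0 (j0 + 1) memo).2).2
            (by omega) hp2.2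
          refine ⟨?_, ?_⟩
          · show 1 + min (pvEdGo s1 s2 i0 (j0 + 1) memo).1 _ = _
            rw [hp1.1, hp2.1, hp3.1, pvE_succ, if_neg hch]
          · show pvGood s1 s2 (PySem.Dict.insert _ (i0 + 1, j0 + 1) _)
            intro q w hq
            rw [PySem.Dict.get?_insert] at hq
            split at hq
            · rename_i hq1
              subst hq1
              cases hq
              rw [hp1.1, hp2.1, hp3.1, pvE_succ, if_neg hch]
            · exact hp3.2 q w hq

theorem pvEd_eq_E (s1 s2 : List Char) : pvEd s1 s2 = pvE s1 s2 s1.length s2.length := by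
  unfold pvEd
  exact (pvEdGo_correct s1 s2 (s1.length + s2.length) s1.length s2.length PySem.Dict.empty
    le_rfl (by intro p v h; simp [PySem.Dict.get?_empty] at h)).1

-- ---- outer loop ----

theorem pvFold_eq (word : String) (dictionary : List String) (st : Option Nat × Option String) :
    dictionary.foldl (fun st w =>
      let distance := edit_distance word.toList w.toList
      match st.1 with
      | none => (some distance, some w)
      | some md => if distance < md then (some distance, some w) else st) st =
    dictionary.foldl (fun st w =>
      let d := pvEd word.toList w.toList
      if st.1 = none ∨ d < st.1.getD 0 then (some d, some w) else st) st := by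
  induction dictionary generalizing st with
  | nil => rfl
  | cons w ws ih =>
    simp only [List.foldl_cons]
    have hd : edit_distance word.toList w.toList = pvEd word.toList w.toList := by
      rw [edit_distance_eq_E, pvEd_eq_E]
    have hstep : (let distance := edit_distance word.toList w.toList
        match st.1 with
        | none => (some distance, some w)
        | some md => if distance < md then (some distance, some w) else st) =
        (let d := pvEd word.toList w.toList
         if st.1 = none ∨ d < st.1.getD 0 then (some d, some w) else st) := by
      rcases st with ⟨md, sw⟩
      cases md <;> simp [hd]
    rw [hstep]
    exact ih _

-- ===== VERDICT (by name: the statement is the Claim_ definition above) =====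
theorem spell_check_spec : Claim_equal_spell_check := by
  intro word dictionary _
  unfold Spec_spell_check spell_check spell_check_alt
  rw [pvFold_eq]
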